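-- pv_equiv track=rewrite | github.com/pushpa-info-14/python-programming | LeetCode/1500-2000/Q1725 Number Of Rectangles That Can Form The Largest Square.py | countGoodRectangles2
-- ===== SOURCE A (Python) =====
-- from typing import List
--
-- def countGoodRectangles2(rectangles: List[List[int]]) -> int:
--     max_l = 0
--     res = 0
--     for x, y in rectangles:
--         square_l = min(x, y)
--         if square_l > max_l:
--             max_l = square_l
--             res = 1
--         elif square_l == max_l:
--             res += 1
--     return res
-- ===== SOURCE B (Python) =====
-- def countGoodRectangles2(rectangles):
--     sides = [min(x, y) for x, y in rectangles]
--     return sides.count(max(sides)) if sides else 0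
-- ===== Notes on version B (the rewrite author's own statement) =====
-- stated objective: simpler
-- what changed: Replaces the single stateful loop maintaining (max_l, res) with a declarative decomposition: build the list of square sides, take its max, count its occurrences.
-- intended difference: On nonempty inputs where every rectangle's shorter side is negative, A returns 0 (its running maximum is initialised to 0 and never updated), while B returns the count of rectangles attaining the true maximal side; B's is the consistent reading of 'count rectangles achieving the maximal square side'. — e.g. on countGoodRectangles2([[-1, -2]]): A returns 0, B returns 1
import Mathlib
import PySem

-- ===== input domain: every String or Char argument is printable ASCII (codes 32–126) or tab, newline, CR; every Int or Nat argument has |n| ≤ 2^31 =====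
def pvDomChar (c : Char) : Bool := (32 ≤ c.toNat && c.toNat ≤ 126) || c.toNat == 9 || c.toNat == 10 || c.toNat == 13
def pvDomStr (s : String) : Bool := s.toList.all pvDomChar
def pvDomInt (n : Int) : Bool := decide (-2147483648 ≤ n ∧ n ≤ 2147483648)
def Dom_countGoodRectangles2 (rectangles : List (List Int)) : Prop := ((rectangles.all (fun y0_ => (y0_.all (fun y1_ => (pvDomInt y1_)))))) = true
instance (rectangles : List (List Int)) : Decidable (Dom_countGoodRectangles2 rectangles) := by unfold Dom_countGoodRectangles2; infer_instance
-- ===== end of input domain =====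

-- B replaces A's single stateful loop with a build-sides / max / count decomposition (same cost);
-- on all-negative inputs A's 0-initialised running max makes it return 0, B counts the true maximum (see D_).


-- ===== PORT A =====
-- one step of A's loop body (the `for x, y in rectangles` body); `_ => s` is unreachable under Pre_
def pvStepA (s : Int × Int) (r : List Int) : Int × Int :=
  match r with
  | [x, y] =>
      let square_l := min x y
      if square_l > s.1 then (square_l, (1 : Int))
      else if square_l = s.1 then (s.1, s.2 + 1)
      else s
  | _ => s

def countGoodRectangles2 (rectangles : List (List Int)) : Int :=
  (rectangles.foldl pvStepA ((0 : Int), (0 : Int))).2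

-- ===== PORT B =====
-- min(x, y) of one rectangle's unpacked pair; `_ => 0` is unreachable under Pre_
def pvSide (r : List Int) : Int :=
  match r with
  | [x, y] => min x y
  | _ => 0

def countGoodRectangles2_alt (rectangles : List (List Int)) : Int :=
  let sides := rectangles.map pvSide
  match sides with
  | [] => 0
  | s :: t => ((s :: t).count (t.foldl max s) : Int)

-- ===== PRECONDITION & SPEC =====
-- Pre_ excludes exactly the inputs where `for x, y in rectangles` raises ValueError: an inner list of length ≠ 2.
def Pre_countGoodRectangles2 (rectangles : List (List Int)) : Prop :=
  ∀ r ∈ rectangles, r.length = 2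

instance (rectangles : List (List Int)) : Decidable (Pre_countGoodRectangles2 rectangles) := by
  unfold Pre_countGoodRectangles2; infer_instance

def pvWitness_countGoodRectangles2 : List (List Int) := [[1, 2], [3, 3]]

-- On nonempty inputs where every rectangle's shorter side is negative, A returns 0 (its running maximum is
-- initialised to 0 and never updated), while B returns the count of rectangles attaining the true maximal
-- side; B's is the consistent reading of "count rectangles achieving the maximal square side".
def D_countGoodRectangles2 (rectangles : List (List Int)) : Prop :=
  rectangles ≠ [] ∧ ∀ r ∈ rectangles, ∃ v ∈ r, v < 0

instance (rectangles : List (List Int)) : Decidable (D_countGoodRectangles2 rectangles) := by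
  unfold D_countGoodRectangles2; infer_instance

def Spec_countGoodRectangles2 (rectangles : List (List Int)) (out : Int) : Prop :=
  ¬ D_countGoodRectangles2 rectangles → out = countGoodRectangles2_alt rectangles

instance (rectangles : List (List Int)) (out : Int) : Decidable (Spec_countGoodRectangles2 rectangles out) := by
  unfold Spec_countGoodRectangles2; infer_instance

def pvDiffWitness_countGoodRectangles2 : List (List Int) := [[-1, -2]]
def pvDiffWitnessOut_countGoodRectangles2 : Int × Int := (0, 1)

-- ===== CLAIM (what is proved, stated in full; the proofs are below) =====
def Claim_unchanged_countGoodRectangles2 : Prop := ∀ (rectangles : List (List Int)), Dom_countGoodRectangles2 rectangles → Pre_countGoodRectangles2 rectangles → Spec_countGoodRectangles2 rectangles (countGoodRectangles2 rectangles)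
def Claim_changed_countGoodRectangles2 : Prop := Dom_countGoodRectangles2 (pvDiffWitness_countGoodRectangles2) ∧ Pre_countGoodRectangles2 (pvDiffWitness_countGoodRectangles2) ∧ D_countGoodRectangles2 (pvDiffWitness_countGoodRectangles2) ∧ countGoodRectangles2 (pvDiffWitness_countGoodRectangles2) = pvDiffWitnessOut_countGoodRectangles2.1 ∧ countGoodRectangles2_alt (pvDiffWitness_countGoodRectangles2) = pvDiffWitnessOut_countGoodRectangles2.2 ∧ pvDiffWitnessOut_countGoodRectangles2.1 ≠ pvDiffWitnessOut_countGoodRectangles2.2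
def Claim_exact_countGoodRectangles2 : Prop := ∀ (rectangles : List (List Int)), Dom_countGoodRectangles2 rectangles → Pre_countGoodRectangles2 rectangles → D_countGoodRectangles2 rectangles → countGoodRectangles2 rectangles ≠ countGoodRectangles2_alt rectangles

-- ===== LEMMAS AND PROOFS =====

-- A's loop step on an already-unpacked side
def pvStepS (s : Int × Int) (q : Int) : Int × Int :=
  if q > s.1 then (q, (1 : Int)) else if q = s.1 then (s.1, s.2 + 1) else s

lemma foldA_eq_foldS : ∀ (rs : List (List Int)) (s : Int × Int),
    (∀ r ∈ rs, r.length = 2) →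
    rs.foldl pvStepA s = (rs.map pvSide).foldl pvStepS s := by
  intro rs
  induction rs with
  | nil => intro s _; rfl
  | cons r t ih =>
    intro s h
    have hr : r.length = 2 := h r (List.mem_cons_self ..)
    match r, hr with
    | [x, y], _ =>
      simp only [List.map_cons, List.foldl_cons]
      have : pvStepA s [x, y] = pvStepS s (pvSide [x, y]) := rfl
      rw [this]
      exact ih _ (fun r hr => h r (List.mem_cons_of_mem _ hr))

lemma foldl_max_out : ∀ (l : List Int) (a b : Int),
    l.foldl max (max a b) = max (l.foldl max a) b := by
  intro l
  induction l with
  | nil => intro a b; rfl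
  | cons x t ih =>
    intro a b
    simp only [List.foldl_cons]
    rw [max_right_comm a b x, ih]

lemma foldS_spec : ∀ (l : List Int) (m c : Int),
    l.foldl pvStepS (m, c)
      = (l.foldl max m,
         (if l.foldl max m = m then c else 0) + (l.count (l.foldl max m) : Int)) := by
  intro l
  induction l with
  | nil => intro m c; simp
  | cons s t ih =>
    intro m c
    have hmem := PySem.List.le_foldl_max t s
    simp only [List.foldl_cons, List.count_cons]
    by_cases h1 : s > m
    · have hmax : max m s = s := by omega
      simp only [hmax]
      have hstep : pvStepS (m, c) s = (s, (1 : Int)) := by simp [pvStepS, h1]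
      rw [hstep, ih]
      have hM : ¬ (t.foldl max s = m) := by
        have := hmem.1; omega
      simp only [hM, if_false]
      by_cases h2 : t.foldl max s = s <;> simp [h2] <;> push_cast <;> omega
    · have hmax : max m s = m := by omega
      simp only [hmax]
      by_cases h2 : s = m
      · have hstep : pvStepS (m, c) s = (m, c + 1) := by simp [pvStepS, h1, h2]
        rw [hstep, ih]
        by_cases h3 : t.foldl max m = m <;> simp [h3, h2] <;> push_cast <;> omega
      · have hstep : pvStepS (m, c) s = (m, c) := by simp [pvStepS, h1, h2]
        rw [hstep, ih]
        have hM : ¬ (t.foldl max m = s) := by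
          have := (PySem.List.le_foldl_max t m).1; omega
        simp [hM]
        omega

-- A's value on length-2 input, as a count over the sides with a 0-floored maximum
lemma A_char (rs : List (List Int)) (h : ∀ r ∈ rs, r.length = 2) :
    countGoodRectangles2 rs
      = ((rs.map pvSide).count ((rs.map pvSide).foldl max 0) : Int) := by
  unfold countGoodRectangles2
  rw [foldA_eq_foldS rs _ h, foldS_spec]
  split_ifs with h0
  · rw [h0]
    have : ((rs.map pvSide).count (0 : Int) : Int) = ((rs.map pvSide).count ((rs.map pvSide).foldl max 0) : Int) := by
      rw [h0]
    simpa [h0] using this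
  · ring

theorem countGoodRectangles2_spec : Claim_unchanged_countGoodRectangles2 := by
  intro rs _ hpre
  intro hnd
  rw [A_char rs hpre]
  unfold countGoodRectangles2_alt
  cases hrs : rs.map pvSide with
  | nil =>
    have : rs = [] := by
      cases rs with
      | nil => rfl
      | cons a t => simp at hrs
    subst this
    simp
  | cons s t =>
    -- rs is nonempty, so ¬D_ gives a rectangle with all entries ≥ 0, hence a side ≥ 0 in s :: t
    have hne : rs ≠ [] := by
      intro h; subst h; simp at hrs
    unfold D_countGoodRectangles2 at hnd
    push_neg at hnd
    obtain ⟨r, hrmem, hrpos⟩ := hnd hne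
    have hside : 0 ≤ pvSide r := by
      have hr2 : r.length = 2 := hpre r hrmem
      match r, hr2 with
      | [x, y], _ =>
        have hx : 0 ≤ x := hrpos x (by simp)
        have hy : 0 ≤ y := hrpos y (by simp)
        simp only [pvSide]; omega
    have hmem : pvSide r ∈ rs.map pvSide := List.mem_map_of_mem hrmem
    rw [hrs] at hmem
    have hM : 0 ≤ t.foldl max s := by
      rcases List.mem_cons.1 hmem with h | h
      · exact le_trans (h ▸ hside) (PySem.List.le_foldl_max t s).1
      · exact le_trans hside ((PySem.List.le_foldl_max t s).2 _ h)
    have : (s :: t).foldl max 0 = t.foldl max s := by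
      simp only [List.foldl_cons]
      have : max 0 s = max s 0 := max_comm 0 s
      rw [this, foldl_max_out]
      omega
    rw [this]

theorem countGoodRectangles2_changed : Claim_changed_countGoodRectangles2 := by
  unfold Claim_changed_countGoodRectangles2; decide

theorem countGoodRectangles2_tight : Claim_exact_countGoodRectangles2 := by
  intro rs _ hpre hd
  obtain ⟨hne, hall⟩ := hd
  -- every side is < 0
  have hsides : ∀ q ∈ rs.map pvSide, q < 0 := by
    intro q hq
    obtain ⟨r, hrmem, hrq⟩ := List.mem_map.1 hq
    have hr2 : r.length = 2 := hpre r hrmem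
    obtain ⟨v, hvmem, hv⟩ := hall r hrmem
    match r, hr2 with
    | [x, y], _ =>
      simp only [List.mem_cons, List.not_mem_nil, or_false] at hvmem
      rcases hvmem with h | h <;> subst h <;> simp only [pvSide] at hrq <;> omega
  rw [A_char rs hpre]
  cases hrs : rs.map pvSide with
  | nil =>
    exfalso
    cases rs with
    | nil => exact hne rfl
    | cons a t => simp at hrs
  | cons s t =>
    -- A counts 0, which is not a side; B counts the attained maximum
    have h0 : (s :: t).foldl max 0 = 0 := by
      have : ∀ (l : List Int) (a : Int), (∀ q ∈ l, q ≤ a) → l.foldl max a = a := by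
        intro l
        induction l with
        | nil => intro a _; rfl
        | cons x u ih =>
          intro a h
          simp only [List.foldl_cons]
          have : max a x = a := by
            have := h x (by simp); omega
          rw [this]
          exact ih a (fun q hq => h q (by simp [hq]))
      refine this _ _ ?_
      intro q hq
      have := hsides q (hrs ▸ hq)
      omega
    rw [h0]
    have hA : ((s :: t).count (0 : Int)) = 0 := by
      rw [List.count_eq_zero]
      intro h
      have := hsides 0 (hrs ▸ h)
      omega
    unfold countGoodRectangles2_alt
    simp only [hrs, hA]
    have hmem : t.foldl max s ∈ s :: t := by
      rcases PySem.List.foldl_max_mem t s with h | h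
      · rw [h]; simp
      · simp [h]
    have hB : 0 < ((s :: t).count (t.foldl max s)) := List.count_pos_iff.2 hmem
    intro hcontra
    simp at hcontra
    omega
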